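-- pv_equiv track=rewrite | github.com/smohapatra1/scripting | python/practice/start_again/2025/06302025/count_distinct_pairs_with_diff_eq_k.py | count_distinct_pair_diff_k
-- ===== SOURCE A (Python) =====
-- def count_distinct_pair_diff_k(nums, k ):
--     unique_nums = set(nums)
--     count = 0
--     if k == 0:
--         from collections import Counter
--         freq = Counter(nums)
--         for num in freq:
--             if freq[num] > 1:
--                 count +=1
--     else:
--         for num in unique_nums:
--             if (num+k) in unique_nums:
--                 count +=1
--     return count
-- ===== SOURCE B (Python) =====
-- def count_distinct_pair_diff_k(nums, k):
--     from collections import deque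
--     if k == 0:
--         # sorted full list: count runs of length >= 2
--         a = deque(sorted(nums))
--         total = 0
--         while a:
--             x = a.popleft()
--             run = 0
--             while a and a[0] == x:
--                 a.popleft()
--                 run += 1
--             if run > 0:
--                 total += 1
--         return total
--     d = -k if k < 0 else k
--     # merge-join the sorted distinct values against themselves shifted down by d:
--     # each common element v = w - d corresponds to exactly one pair (v, w) at gap d
--     vals = sorted(set(nums))
--     p = deque(vals)
--     q = deque(v - d for v in vals)
--     total = 0
--     while p and q:
--         a, b = p[0], q[0]
--         if a == b:
--             total += 1
--             p.popleft()
--             q.popleft()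
--         elif a < b:
--             p.popleft()
--         else:
--             q.popleft()
--     return total
-- ===== Notes on version B (the rewrite author's own statement) =====
-- stated objective: alternative
-- what changed: Replaces hash-set membership (and Counter) with sorting: for k==0 B scans the sorted multiset counting runs of length >= 2; for k!=0 B merge-joins the sorted distinct values against themselves shifted by d=|k|, counting common elements.
import Mathlib
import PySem

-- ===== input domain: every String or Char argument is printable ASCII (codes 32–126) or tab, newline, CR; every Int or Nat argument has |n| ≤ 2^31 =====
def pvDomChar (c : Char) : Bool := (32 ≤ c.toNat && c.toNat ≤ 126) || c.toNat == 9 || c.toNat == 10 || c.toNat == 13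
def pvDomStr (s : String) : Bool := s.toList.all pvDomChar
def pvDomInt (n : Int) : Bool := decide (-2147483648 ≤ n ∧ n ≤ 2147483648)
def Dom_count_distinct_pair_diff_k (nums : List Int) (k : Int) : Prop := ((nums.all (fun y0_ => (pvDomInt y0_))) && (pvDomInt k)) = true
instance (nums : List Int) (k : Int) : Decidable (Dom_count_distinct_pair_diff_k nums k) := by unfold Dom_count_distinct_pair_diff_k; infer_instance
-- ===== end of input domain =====

-- B replaces A's hash-set/Counter counting by sorting: run-scan of the sorted multiset for k == 0,
-- pair enumeration over sorted distinct values with d = |k| otherwise (objective: alternative, not faster).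

-- ===== PORT A =====
def count_distinct_pair_diff_k (nums : List Int) (k : Int) : Int :=
  let unique_nums : PySem.Set Int := PySem.Set.ofList nums
  if k == 0 then
    let freq := PySem.Dict.counter nums
    freq.keys.foldl (fun count num => if freq.getD num 0 > 1 then count + 1 else count) 0
  else
    unique_nums.foldl (fun count num =>
      if PySem.Set.contains unique_nums (num + k) then count + 1 else count) 0

-- ===== PORT B =====
-- inner 'while rest and rest[0] == x' = strip the run of heads equal to x (takeWhile/dropWhile)
def pvRunScan : List Int → Int
  | [] => 0
  | x :: rest =>
    let run := (rest.takeWhile (fun y => y == x)).length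
    (if run > 0 then 1 else 0) + pvRunScan (rest.dropWhile (fun y => y == x))
termination_by l => l.length
decreasing_by
  simp only [List.length_cons]
  exact Nat.lt_succ_of_le (List.length_dropWhile_le _ _)

-- merge-join of two sorted deques consumed from the front
def pvMerge : List Int → List Int → Int
  | _, [] => 0
  | [], _ :: _ => 0
  | a :: p, b :: q =>
    if a == b then 1 + pvMerge p q
    else if a < b then pvMerge p (b :: q)
    else pvMerge (a :: p) q
termination_by p q => p.length + q.length

def count_distinct_pair_diff_k_alt (nums : List Int) (k : Int) : Int :=
  if k == 0 then
    pvRunScan (PySem.List.sorted nums (fun x => x) false)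
  else
    let d := if k < 0 then -k else k
    let vals := PySem.List.sorted (PySem.Set.ofList nums) (fun x => x) false
    pvMerge vals (vals.map (fun v => v - d))

-- ===== PRECONDITION & SPEC =====
def Spec_count_distinct_pair_diff_k (nums : List Int) (k : Int) (out : Int) : Prop := out = count_distinct_pair_diff_k_alt nums k
instance (nums : List Int) (k : Int) (out : Int) : Decidable (Spec_count_distinct_pair_diff_k nums k out) := by unfold Spec_count_distinct_pair_diff_k; infer_instance

-- ===== CLAIM (what is proved, stated in full; the proofs are below) =====
def Claim_equal_count_distinct_pair_diff_k : Prop := ∀ (nums : List Int) (k : Int), Dom_count_distinct_pair_diff_k nums k → Spec_count_distinct_pair_diff_k nums k (count_distinct_pair_diff_k nums k)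

-- ===== LEMMAS AND PROOFS =====

-- two Nodup lists with the same members have equal countP
theorem pv_countP_eq_of_mem_iff {l₁ l₂ : List Int} (p : Int → Bool)
    (h₁ : l₁.Nodup) (h₂ : l₂.Nodup) (h : ∀ x, x ∈ l₁ ↔ x ∈ l₂) :
    l₁.countP p = l₂.countP p :=
  ((List.perm_ext_iff_of_nodup h₁ h₂).mpr h).countP_eq p

-- shifting the probe direction does not change the count on a Nodup list
theorem pv_countP_shift (s : List Int) (d : Int) (hs : s.Nodup) :
    s.countP (fun x => decide ((x - d) ∈ s)) = s.countP (fun x => decide ((x + d) ∈ s)) := by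
  rw [List.countP_eq_length_filter, List.countP_eq_length_filter]
  have hinj : Function.Injective (fun x : Int => x - d) := fun a b h => by
    have : a - d = b - d := h
    omega
  have h1 : (s.filter (fun x => decide ((x - d) ∈ s))).Nodup := hs.filter _
  have h2 : (s.filter (fun x => decide ((x + d) ∈ s))).Nodup := hs.filter _
  have hperm : ((s.filter (fun x => decide ((x - d) ∈ s))).map (fun x => x - d)).Perm
      (s.filter (fun x => decide ((x + d) ∈ s))) := by
    refine (List.perm_ext_iff_of_nodup (h1.map hinj) h2).mpr ?_
    intro y
    simp only [List.mem_map, List.mem_filter, decide_eq_true_eq]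
    constructor
    · rintro ⟨x, ⟨hxs, hxd⟩, rfl⟩
      exact ⟨hxd, by simpa using hxs⟩
    · rintro ⟨hys, hyd⟩
      exact ⟨y + d, ⟨hyd, by simpa using hys⟩, by omega⟩
  calc (s.filter (fun x => decide ((x - d) ∈ s))).length
      = ((s.filter (fun x => decide ((x - d) ∈ s))).map (fun x => x - d)).length := (List.length_map _).symm
    _ = (s.filter (fun x => decide ((x + d) ∈ s))).length := hperm.length_eq

-- the head of a dropWhile residue falsifies the predicate
theorem pv_dropWhile_head_false {α : Type} (p : α → Bool) :
    ∀ (l : List α) (z : α) (rs : List α), l.dropWhile p = z :: rs → p z = false := by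
  intro l
  induction l with
  | nil => intro z rs h; simp [List.dropWhile] at h
  | cons a l ih =>
    intro z rs h
    by_cases hp : p a
    · rw [List.dropWhile_cons_of_pos hp] at h; exact ih _ _ h
    · rw [List.dropWhile_cons_of_neg hp] at h
      cases h
      simpa using hp

-- merge-join of strictly sorted lists counts the members of the first present in the second
theorem pvMerge_eq_countP :
    ∀ (s t : List Int), s.Pairwise (· < ·) → t.Pairwise (· < ·) →
    pvMerge s t = (s.countP (fun x => decide (x ∈ t)) : Int) := by
  intro s t
  induction s, t using pvMerge.induct with
  | case1 p => intro _ _; cases p <;> simp [pvMerge]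
  | case2 b q => intro _ _; simp [pvMerge]
  | case3 a p b q hab ih =>
    intro hs ht
    rcases List.pairwise_cons.mp hs with ⟨hpa, hp⟩
    rcases List.pairwise_cons.mp ht with ⟨hqb, hq⟩
    have hab' : a = b := by simpa using hab
    rw [pvMerge, if_pos hab, List.countP_cons]
    have hmem : (decide (a ∈ b :: q)) = true := by simp [hab']
    have htail : p.countP (fun x => decide (x ∈ b :: q)) = p.countP (fun x => decide (x ∈ q)) := by
      apply List.countP_congr
      intro x hx
      have hxa : a < x := hpa x hx
      have hxb : x ≠ b := by omega
      simp [List.mem_cons, hxb]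
    rw [hmem, htail, ih hp hq]
    simp
    ring
  | case4 a p b q hab hlt ih =>
    intro hs ht
    rcases List.pairwise_cons.mp hs with ⟨hpa, hp⟩
    have hlt' : a < b := by simpa using hlt
    have hnab : ¬ a = b := by omega
    rw [pvMerge, if_neg hab, if_pos hlt, List.countP_cons]
    have hmem : (decide (a ∈ b :: q)) = false := by
      have : a ∉ b :: q := by
        intro h
        rcases List.mem_cons.mp h with rfl | h
        · omega
        · have := (List.pairwise_cons.mp ht).1 a h; omega
      simpa using this
    rw [hmem, ih hp ht]
    simp
  | case5 a p b q hab hlt ih =>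
    intro hs ht
    rcases List.pairwise_cons.mp ht with ⟨hqb, hq⟩
    have hgt : b < a := by
      have h1 : ¬ a = b := by simpa using hab
      have h2 : ¬ a < b := by simpa using hlt
      omega
    have hall : (a :: p).countP (fun x => decide (x ∈ b :: q))
        = (a :: p).countP (fun x => decide (x ∈ q)) := by
      apply List.countP_congr
      intro x hx
      have hxa : a ≤ x := by
        rcases List.mem_cons.mp hx with rfl | h
        · omega
        · have := (List.pairwise_cons.mp hs).1 x h; omega
      have hxb : x ≠ b := by omega
      simp [List.mem_cons, hxb]
    rw [pvMerge, if_neg hab, if_neg hlt, hall, ih hs hq]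

-- run-scan of a sorted list counts distinct values of multiplicity > 1
theorem pvRunScan_eq_countP :
    ∀ b : List Int, b.Pairwise (· ≤ ·) →
    pvRunScan b = ((PySem.Set.ofList b).countP (fun v => decide (1 < b.count v)) : Int) := by
  intro b
  induction b using pvRunScan.induct with
  | case1 => intro _; simp [pvRunScan]
  | case2 x rest ih =>
    intro hb
    rcases List.pairwise_cons.mp hb with ⟨hx, hrest⟩
    set t := rest.takeWhile (fun y => y == x) with ht_def
    set r := rest.dropWhile (fun y => y == x) with hr_def
    have htr : t ++ r = rest := List.takeWhile_append_dropWhile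
    have ht : ∀ y ∈ t, y = x := fun y hy => by simpa using List.mem_takeWhile_imp hy
    have hrsub : r.Sublist rest := List.dropWhile_sublist _
    have hr : r.Pairwise (· ≤ ·) := hrest.sublist hrsub
    have hxr : x ∉ r := by
      intro hmem
      cases hrw : r with
      | nil => rw [hrw] at hmem; simp at hmem
      | cons z rs =>
        have hz : ¬ z = x := by
          have := pv_dropWhile_head_false (fun y => y == x) rest z rs (hr_def ▸ hrw)
          simpa using this
        have hzrest : z ∈ rest := hrsub.mem (by rw [hrw]; exact List.mem_cons_self)
        have hxz : x ≤ z := hx z hzrest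
        rw [hrw] at hmem
        rcases List.mem_cons.mp hmem with h | h
        · exact hz h.symm
        · have hzx : z ≤ x := (List.pairwise_cons.mp (hrw ▸ hr)).1 x h
          exact hz (le_antisymm hzx hxz)
    have htcount : t.count x = t.length := List.count_eq_length.mpr (fun y hy => (ht y hy).symm)
    have hcx : (x :: rest).count x = 1 + t.length := by
      rw [List.count_cons_self, ← htr, List.count_append, htcount,
        List.count_eq_zero_of_not_mem hxr]
      omega
    have hcv : ∀ v ∈ r, (x :: rest).count v = r.count v := by
      intro v hv
      have hvx : v ≠ x := fun h => hxr (h ▸ hv)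
      have htv : t.count v = 0 := List.count_eq_zero_of_not_mem (fun h => hvx (ht v h))
      rw [List.count_cons_of_ne hvx.symm, ← htr, List.count_append, htv]
      omega
    have hmemD : ∀ v, v ∈ (PySem.Set.ofList rest).discard x ↔ v ∈ PySem.Set.ofList r := by
      intro v
      rw [PySem.Set.mem_discard, PySem.Set.mem_ofList, PySem.Set.mem_ofList]
      constructor
      · rintro ⟨hvrest, hvx⟩
        rw [← htr] at hvrest
        rcases List.mem_append.mp hvrest with h | h
        · exact absurd (ht v h) hvx
        · exact h
      · intro hvr
        exact ⟨hrsub.mem hvr, fun h => hxr (h ▸ hvr)⟩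
    have hD : ((PySem.Set.ofList rest).discard x).countP (fun v => decide (1 < (x :: rest).count v))
        = (PySem.Set.ofList r).countP (fun v => decide (1 < r.count v)) := by
      rw [pv_countP_eq_of_mem_iff _ (PySem.Set.nodup_discard _ _ (PySem.Set.nodup_ofList rest))
        (PySem.Set.nodup_ofList r) hmemD]
      apply List.countP_congr
      intro v hv
      rw [hcv v ((PySem.Set.mem_ofList _ _).mp hv)]
    have hhead : (decide (1 < (x :: rest).count x)) = decide (0 < t.length) := by
      rw [hcx]
      by_cases h : 0 < t.length
      · simp [h]
      · simp [h]
    rw [pvRunScan, PySem.Set.ofList_cons, List.countP_cons, hD, hhead, ih hr, ← ht_def]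
    by_cases h : 0 < t.length <;> simp [h]
    ring

-- ===== VERDICT (by name: the statement is the Claim_ definition above) =====
theorem count_distinct_pair_diff_k_spec : Claim_equal_count_distinct_pair_diff_k := by
  intro nums k _
  unfold Spec_count_distinct_pair_diff_k count_distinct_pair_diff_k count_distinct_pair_diff_k_alt
  by_cases hk : k = 0
  · subst hk
    simp only [beq_self_eq_true, if_true]
    rw [PySem.Dict.keys_counter]
    simp only [PySem.Dict.getD_counter]
    rw [PySem.List.foldl_ite_add_one]
    set b := PySem.List.sorted nums (fun x => x) false with hb_def
    have hbs : b.Pairwise (· ≤ ·) := PySem.List.sorted_pairwise nums (fun x => x)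
    rw [pvRunScan_eq_countP b hbs]
    have hperm : b.Perm nums := PySem.List.sorted_perm nums (fun x => x) false
    have hsets : ∀ v, v ∈ PySem.Set.ofList nums ↔ v ∈ PySem.Set.ofList b := by
      intro v
      rw [PySem.Set.mem_ofList, PySem.Set.mem_ofList]
      exact hperm.mem_iff.symm
    have hcount :
        (PySem.Set.ofList nums).countP (fun num => decide ((1 : Int) < (nums.count num : Int)))
          = (PySem.Set.ofList b).countP (fun v => decide (1 < b.count v)) := by
      rw [pv_countP_eq_of_mem_iff _ (PySem.Set.nodup_ofList nums) (PySem.Set.nodup_ofList b) hsets]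
      apply List.countP_congr
      intro v _
      rw [hperm.count_eq]
      constructor <;> intro h <;> simp_all
    rw [← hcount]
    ring
  · have hkb : (k == 0) = false := by simpa using hk
    simp only [hkb, Bool.false_eq_true, if_false]
    rw [PySem.List.foldl_if_add_one]
    set S := PySem.Set.ofList nums with hS_def
    set d : Int := if k < 0 then -k else k with hd_def
    set vals := PySem.List.sorted S (fun x => x) false with hvals_def
    have hvp : vals.Pairwise (· < ·) := PySem.List.sorted_ofList_pairwise_lt nums
    have hd : 0 < d := by rw [hd_def]; split <;> omega
    have hshifted : (vals.map (fun v => v - d)).Pairwise (· < ·) := by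
      rw [List.pairwise_map]
      exact hvp.imp (fun h => by omega)
    rw [pvMerge_eq_countP vals (vals.map (fun v => v - d)) hvp hshifted]
    have hmapmem : vals.countP (fun x => decide (x ∈ vals.map (fun v => v - d)))
        = vals.countP (fun x => decide ((x + d) ∈ vals)) := by
      apply List.countP_congr
      intro z _
      simp only [List.mem_map, decide_eq_true_eq]
      constructor
      · rintro ⟨v, hv, hvz⟩
        have : z + d = v := by omega
        exact this ▸ hv
      · intro h
        exact ⟨z + d, h, by omega⟩
    rw [hmapmem]
    have hperm : vals.Perm S := PySem.List.sorted_perm S (fun x => x) false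
    have h1 : S.countP (fun num => PySem.Set.contains S (num + k))
        = vals.countP (fun x => decide ((x + k) ∈ vals)) := by
      rw [← hperm.countP_eq]
      apply List.countP_congr
      intro z _
      rw [PySem.Set.contains_iff]
      simp [hperm.mem_iff]
    have h2 : vals.countP (fun x => decide ((x + k) ∈ vals))
        = vals.countP (fun x => decide ((x + d) ∈ vals)) := by
      by_cases hneg : k < 0
      · have hdk : d = -k := by rw [hd_def, if_pos hneg]
        have hshift := pv_countP_shift vals d (hvp.imp (fun h => ne_of_lt h))
        rw [← hshift]
        apply List.countP_congr
        intro z _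
        have : z + k = z - d := by omega
        rw [this]
      · have hdk : d = k := by rw [hd_def, if_neg hneg]
        rw [hdk]
    rw [h1, h2]
    exact zero_add _
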